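-- pv_equiv track=rewrite | github.com/hnolCol/instantclue | funcs/get_ms_data.py | filter_isotopes_list
-- ===== SOURCE A (Python) =====
-- def filter_isotopes_list(mass_list_with_isotopes):
--      index = []
--      for i in range(len(mass_list_with_isotopes)):
--          try:
--              list_to_check = mass_list_with_isotopes[i]
--              if len(list_to_check) > 0:
--                  for n in range(i,len(mass_list_with_isotopes)):
--                      try:
--                           list_to_compare = mass_list_with_isotopes[n+1]
--                           if len([m for m in list_to_check if m in list_to_compare]) > 0:
--                               index.append(n+1)
--                      except:
--                           pass
--          except:
--              pass
--      return index
-- ===== SOURCE B (Python) =====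
-- def filter_isotopes_list(mass_list_with_isotopes):
--     # inverted index: value -> set of list indices containing it
--     occ = {}
--     for idx, lst in enumerate(mass_list_with_isotopes):
--         for v in lst:
--             occ.setdefault(v, set()).add(idx)
--     out = []
--     for i, lst in enumerate(mass_list_with_isotopes):
--         js = set()
--         for v in lst:
--             for j in occ[v]:
--                 if j > i:
--                     js.add(j)
--         out.extend(sorted(js))
--     return out
-- ===== Notes on version B (the rewrite author's own statement) =====
-- stated objective: faster
-- what changed: B builds an inverted index value->set of list indices in one pass and, per list, collects the sorted set of later partner indices from the index, instead of A's nested loops that intersect every pair of lists by a quadratic membership scan inside try/except.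
import Mathlib
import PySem

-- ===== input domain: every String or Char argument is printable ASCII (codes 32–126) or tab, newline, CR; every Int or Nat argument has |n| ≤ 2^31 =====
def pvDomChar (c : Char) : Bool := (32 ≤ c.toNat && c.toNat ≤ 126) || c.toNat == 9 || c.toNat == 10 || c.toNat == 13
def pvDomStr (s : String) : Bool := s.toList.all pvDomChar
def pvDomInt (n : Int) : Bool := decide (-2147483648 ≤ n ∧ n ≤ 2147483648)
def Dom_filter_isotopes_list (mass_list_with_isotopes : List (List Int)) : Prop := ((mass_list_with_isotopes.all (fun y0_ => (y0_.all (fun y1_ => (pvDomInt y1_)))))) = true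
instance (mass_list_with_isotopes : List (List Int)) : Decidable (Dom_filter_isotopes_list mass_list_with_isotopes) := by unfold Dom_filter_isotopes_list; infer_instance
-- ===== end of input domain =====

-- B replaces A's nested pairwise intersection scans by a one-pass inverted index value -> set of list indices; proved to return A's exact value.

-- ===== PORT A =====
def filter_isotopes_list (mass_list_with_isotopes : List (List Int)) : List Int :=
  (PySem.List.pyRange 0 (mass_list_with_isotopes.length : Int)).foldl
    (fun index i =>
      match PySem.List.pyGet? mass_list_with_isotopes i with
      | none => index
      | some list_to_check =>
        if 0 < list_to_check.length then
          (PySem.List.pyRange i (mass_list_with_isotopes.length : Int)).foldl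
            (fun index n =>
              match PySem.List.pyGet? mass_list_with_isotopes (n + 1) with
              | none => index
              | some list_to_compare =>
                if 0 < (list_to_check.filter (fun m => decide (m ∈ list_to_compare))).length
                then index ++ [n + 1] else index)
            index
        else index)
    []

-- ===== PORT B =====
-- inverted index: value -> set of list indices containing it (Source B's first loop)
def pvOccIndex (ml : List (List Int)) : PySem.Dict Int (PySem.Set Int) :=
  (PySem.List.enumerate ml).foldl
    (fun occ p =>
      p.2.foldl (fun occ v => occ.insert v ((occ.getD v ([] : PySem.Set Int)).add p.1)) occ)
    ∅

def filter_isotopes_list_alt (mass_list_with_isotopes : List (List Int)) : List Int :=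
  let occ := pvOccIndex mass_list_with_isotopes
  (PySem.List.enumerate mass_list_with_isotopes).foldl
    (fun out p =>
      let js : PySem.Set Int := p.2.foldl
        (fun js v =>
          (occ.getD v ([] : PySem.Set Int)).foldl
            (fun js j => if j > p.1 then js.add j else js) js)
        ([] : PySem.Set Int)
      out ++ PySem.List.sorted js (fun j => j))
    []

-- ===== PRECONDITION & SPEC =====
def Spec_filter_isotopes_list (mass_list_with_isotopes : List (List Int)) (out : List Int) : Prop := out = filter_isotopes_list_alt mass_list_with_isotopes
instance (mass_list_with_isotopes : List (List Int)) (out : List Int) : Decidable (Spec_filter_isotopes_list mass_list_with_isotopes out) := by unfold Spec_filter_isotopes_list; infer_instance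

-- ===== CLAIM (what is proved, stated in full; the proofs are below) =====
def Claim_equal_filter_isotopes_list : Prop := ∀ (mass_list_with_isotopes : List (List Int)), Dom_filter_isotopes_list mass_list_with_isotopes → Spec_filter_isotopes_list mass_list_with_isotopes (filter_isotopes_list mass_list_with_isotopes)

-- ===== LEMMAS AND PROOFS =====

lemma pv_filter_pos (l : List Int) (p : Int → Bool) :
    (0 < (l.filter p).length) ↔ l.any p := by
  simp [List.length_pos_iff, List.any_eq_true]

lemma pv_map_add_one (a b : Int) :
    (PySem.List.pyRange a b).map (fun n => n + 1) = PySem.List.pyRange (a + 1) (b + 1) := by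
  by_cases h : b ≤ a
  · simp [PySem.List.pyRange_one_eq_nil h, PySem.List.pyRange_one_eq_nil (by omega : b + 1 ≤ a + 1)]
  · have H : ∀ (m : Nat) (a : Int), b - a ≤ m →
        (PySem.List.pyRange a b).map (fun n => n + 1) = PySem.List.pyRange (a + 1) (b + 1) := by
      intro m
      induction m with
      | zero => intro a ha; simp [PySem.List.pyRange_one_eq_nil (by omega : b ≤ a),
          PySem.List.pyRange_one_eq_nil (by omega : b + 1 ≤ a + 1)]
      | succ m ih =>
        intro a ha
        by_cases h' : b ≤ a
        · simp [PySem.List.pyRange_one_eq_nil h', PySem.List.pyRange_one_eq_nil (by omega : b + 1 ≤ a + 1)]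
        · rw [PySem.List.pyRange_one_cons (by omega : a < b), PySem.List.pyRange_one_cons (by omega : a + 1 < b + 1)]
          simp only [List.map_cons]
          rw [ih (a + 1) (by omega)]
    exact H (b - a).toNat a (by omega)

lemma pv_enumerate_eq (xs : List (List Int)) (s : Int) :
    PySem.List.enumerate xs s =
      (List.range xs.length).map (fun (k : Nat) => (s + (k : Int), xs.getD k [])) := by
  induction xs generalizing s with
  | nil => simp [PySem.List.enumerate]
  | cons x xs ih =>
    simp [PySem.List.enumerate, ih (s+1), List.range_succ_eq_map, Function.comp]
    intro a _; omega

lemma pv_js_inner_mem (i : Int) (occl : List Int) (js : PySem.Set Int) (j : Int) :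
    (j ∈ occl.foldl (fun js j' => if j' > i then PySem.Set.add js j' else js) js) ↔
      j ∈ js ∨ (j ∈ occl ∧ i < j) := by
  induction occl generalizing js with
  | nil => simp
  | cons x xs ih =>
    simp only [List.foldl_cons, ih]
    by_cases hx : x > i
    · simp [hx, PySem.Set.mem_add]
      constructor
      · rintro ((h|h)|h)
        · tauto
        · exact Or.inr ⟨Or.inl h, by omega⟩
        · exact Or.inr ⟨Or.inr h.1, h.2⟩
      · rintro (h|⟨(h|h),h2⟩)
        · tauto
        · subst h; tauto
        · tauto
    · simp [hx]
      constructor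
      · rintro (h|h) <;> tauto
      · rintro (h|⟨(h|h),h2⟩) <;> subst_eqs <;> tauto

lemma pv_js_inner_nodup (i : Int) (occl : List Int) (js : PySem.Set Int) (h : js.Nodup) :
    (occl.foldl (fun js j' => if j' > i then PySem.Set.add js j' else js) js).Nodup := by
  induction occl generalizing js with
  | nil => exact h
  | cons x xs ih =>
    simp only [List.foldl_cons]
    by_cases hx : x > i
    · simp only [hx, if_pos]; exact ih _ (PySem.Set.nodup_add js x h)
    · simp only [hx, ite_false]; exact ih _ h

lemma pv_occ_inner (idx : Int) (lst : List Int) (occ : PySem.Dict Int (PySem.Set Int)) (v j : Int) :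
    (j ∈ (lst.foldl (fun occ v' => occ.insert v' ((occ.getD v' ([] : PySem.Set Int)).add idx)) occ).getD v ([] : PySem.Set Int)) ↔
      j ∈ occ.getD v ([] : PySem.Set Int) ∨ (v ∈ lst ∧ j = idx) := by
  induction lst generalizing occ with
  | nil => simp
  | cons x xs ih =>
    simp only [List.foldl_cons, ih, PySem.Dict.getD_insert]
    by_cases hv : v = x
    · subst hv
      simp [PySem.Set.mem_add]
      tauto
    · simp only [hv, if_false, List.mem_cons]
      tauto

lemma pv_empty_getD (v : Int) : (∅ : PySem.Dict Int (PySem.Set Int)).getD v ([] : PySem.Set Int) = [] := by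
  rfl

lemma pv_occ_aux (xs : List (List Int)) (v j : Int) :
    ∀ (s : Int) (d : PySem.Dict Int (PySem.Set Int)),
    (j ∈ ((PySem.List.enumerate xs s).foldl
        (fun occ p => p.2.foldl (fun occ v' => occ.insert v' ((occ.getD v' ([] : PySem.Set Int)).add p.1)) occ) d).getD v ([] : PySem.Set Int)) ↔
      j ∈ d.getD v ([] : PySem.Set Int) ∨ ∃ k : Nat, k < xs.length ∧ j = s + (k : Int) ∧ v ∈ xs.getD k [] := by
  induction xs with
  | nil => intro s d; simp [PySem.List.enumerate]
  | cons x xs ih =>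
    intro s d
    simp only [PySem.List.enumerate, List.foldl_cons]
    rw [ih (s+1)]
    rw [pv_occ_inner]
    constructor
    · rintro ((h|h)|⟨k,hk,hj,hv⟩)
      · exact Or.inl h
      · exact Or.inr ⟨0, by simp, by omega, by simpa using h.1⟩
      · refine Or.inr ⟨k+1, by simp only [List.length_cons]; omega, by push_cast; omega, by simpa using hv⟩
    · rintro (h|⟨k,hk,hj,hv⟩)
      · exact Or.inl (Or.inl h)
      · cases k with
        | zero => exact Or.inl (Or.inr ⟨by simpa using hv, by omega⟩)
        | succ k => exact Or.inr ⟨k, by simp only [List.length_cons] at hk; omega, by push_cast at hj ⊢; omega, by simpa using hv⟩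

lemma pv_occ_mem (ml : List (List Int)) (v j : Int) :
    (j ∈ (pvOccIndex ml).getD v ([] : PySem.Set Int)) ↔
      ∃ k : Nat, k < ml.length ∧ j = (k : Int) ∧ v ∈ ml.getD k [] := by
  unfold pvOccIndex
  rw [pv_occ_aux]
  simp [pv_empty_getD]

def pvBlock (ml : List (List Int)) (k : Nat) : List Int :=
  (PySem.List.pyRange ((k : Int) + 1) (ml.length : Int)).filter
    (fun j => (ml.getD k []).any (fun v => decide (v ∈ ml.getD j.toNat [])))

lemma pvBlock_pairwise (ml : List (List Int)) (k : Nat) :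
    List.Pairwise (fun a b : Int => a < b) (pvBlock ml k) :=
  (PySem.List.pairwise_lt_pyRange_one _ _).filter _

lemma pv_js_mem (occ : PySem.Dict Int (PySem.Set Int)) (i : Int) (lst : List Int) (js0 : PySem.Set Int) (j : Int) :
    (j ∈ lst.foldl (fun js v => (occ.getD v ([] : PySem.Set Int)).foldl
        (fun js j' => if j' > i then PySem.Set.add js j' else js) js) js0) ↔
      j ∈ js0 ∨ ∃ v ∈ lst, j ∈ occ.getD v ([] : PySem.Set Int) ∧ i < j := by
  induction lst generalizing js0 with
  | nil => simp
  | cons x xs ih =>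
    simp only [List.foldl_cons, ih, pv_js_inner_mem, List.mem_cons]
    constructor
    · rintro ((h|h)|⟨v,hv,h⟩)
      · tauto
      · exact Or.inr ⟨x, Or.inl rfl, h.1, h.2⟩
      · exact Or.inr ⟨v, Or.inr hv, h⟩
    · rintro (h|⟨v,(hv|hv),h⟩)
      · tauto
      · subst hv; exact Or.inl (Or.inr h)
      · exact Or.inr ⟨v, hv, h⟩

lemma pv_js_nodup (occ : PySem.Dict Int (PySem.Set Int)) (i : Int) (lst : List Int) (js0 : PySem.Set Int) (h : js0.Nodup) :
    (lst.foldl (fun js v => (occ.getD v ([] : PySem.Set Int)).foldl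
        (fun js j' => if j' > i then PySem.Set.add js j' else js) js) js0).Nodup := by
  induction lst generalizing js0 with
  | nil => exact h
  | cons x xs ih =>
    exact ih _ (pv_js_inner_nodup i _ _ h)

lemma pvB_block (ml : List (List Int)) (k : Nat) :
    PySem.List.sorted ((ml.getD k []).foldl
        (fun js v => ((pvOccIndex ml).getD v ([] : PySem.Set Int)).foldl
          (fun js j' => if j' > (k : Int) then PySem.Set.add js j' else js) js)
        ([] : PySem.Set Int)) (fun j => j) = pvBlock ml k := by
  apply PySem.List.sorted_eq_of_perm_of_pairwise_lt
  · rw [List.perm_ext_iff_of_nodup (pvBlock_pairwise ml k).nodup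
      (pv_js_nodup _ _ _ _ List.nodup_nil)]
    intro j
    rw [pv_js_mem]
    simp only [List.mem_filter, PySem.List.mem_pyRange_one, List.any_eq_true, decide_eq_true_eq,
      pvBlock, List.not_mem_nil, false_or]
    constructor
    · rintro ⟨⟨h1, h2⟩, v, hv, hvj⟩
      refine ⟨v, hv, ?_, by omega⟩
      rw [pv_occ_mem]
      exact ⟨j.toNat, by omega, by omega, hvj⟩
    · rintro ⟨v, hv, hocc, hj⟩
      rw [pv_occ_mem] at hocc
      obtain ⟨k', hk', rfl, hv'⟩ := hocc
      exact ⟨⟨by omega, by omega⟩, v, hv, by simpa using hv'⟩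
  · exact pvBlock_pairwise ml k

def pvRef (ml : List (List Int)) : List Int := (List.range ml.length).flatMap (pvBlock ml)

lemma pvB_eq_ref (ml : List (List Int)) : filter_isotopes_list_alt ml = pvRef ml := by
  unfold filter_isotopes_list_alt pvRef
  rw [pv_enumerate_eq ml 0, List.foldl_map]
  rw [PySem.List.foldl_congr_mem (List.range ml.length) _ (fun out k => out ++ pvBlock ml k) []
    (by
      intro acc k hk
      simp only [List.mem_range] at hk
      simp only [zero_add]
      exact congrArg (acc ++ ·) (pvB_block ml k))]
  rw [PySem.List.foldl_append_eq_flatMap]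
  simp

lemma pvA_block (ml : List (List Int)) (k : Nat) (hk : k < ml.length) (acc : List Int) :
    (PySem.List.pyRange (k : Int) (ml.length : Int)).foldl
      (fun index n =>
        match PySem.List.pyGet? ml (n + 1) with
        | none => index
        | some list_to_compare =>
          if 0 < ((ml.getD k []).filter (fun m => decide (m ∈ list_to_compare))).length
          then index ++ [n + 1] else index)
      acc = acc ++ pvBlock ml k := by
  set q : Int → Bool := fun j => decide (j < (ml.length : Int)) &&
    (ml.getD k []).any (fun v => decide (v ∈ ml.getD j.toNat [])) with hq
  rw [PySem.List.foldl_congr_mem _ _ (fun idx n => if q (n + 1) then idx ++ [n + 1] else idx) acc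
    (by
      intro idx n hn
      rw [PySem.List.mem_pyRange_one] at hn
      by_cases hlt : n + 1 < (ml.length : Int)
      · rw [show (n + 1 : Int) = (((n + 1).toNat : Nat) : Int) by omega, PySem.List.pyGet?_natCast,
          List.getElem?_eq_getElem (by omega : (n + 1).toNat < ml.length)]
        simp only [hq, pv_filter_pos]
        have h3 : (((n + 1).toNat : Nat) : Int) = n + 1 := by omega
        rw [h3, List.getD_eq_getElem ml [] (by omega : (n+1).toNat < ml.length)]
        have hd : decide (n + 1 < (ml.length : Int)) = true := by simp [hlt]
        rw [hd, Bool.true_and]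
      · rw [show (n + 1 : Int) = ((ml.length : Nat) : Int) by omega, PySem.List.pyGet?_natCast,
          List.getElem?_eq_none (by omega)]
        simp only [hq]
        have hd : decide (n + 1 < (ml.length : Int)) = false := by simp; omega
        rw [hd, Bool.false_and]
        simp)]
  rw [PySem.List.foldl_append_if (fun n => q (n + 1)) (fun n => n + 1)]
  have hcomp : (fun n : Int => q (n + 1)) = q ∘ (fun n : Int => n + 1) := rfl
  rw [hcomp, ← List.filter_map, pv_map_add_one, PySem.List.pyRange_one_succ_right (by omega : (k : Int) + 1 ≤ (ml.length : Int))]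
  rw [List.filter_append]
  have h1 : List.filter q [(ml.length : Int)] = [] := by simp [hq]
  have h2 : List.filter q (PySem.List.pyRange ((k : Int) + 1) (ml.length : Int)) = pvBlock ml k := by
    unfold pvBlock
    apply List.filter_congr
    intro j hj
    rw [PySem.List.mem_pyRange_one] at hj
    simp only [hq]
    have : decide (j < (ml.length : Int)) = true := by simp; omega
    rw [this, Bool.true_and]
  rw [h1, h2, List.append_nil]

lemma pvA_eq_ref (ml : List (List Int)) : filter_isotopes_list ml = pvRef ml := by
  unfold filter_isotopes_list pvRef
  rw [PySem.List.pyRange_zero_natCast, List.foldl_map]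
  rw [PySem.List.foldl_congr_mem (List.range ml.length) _ (fun acc k => acc ++ pvBlock ml k) []
    (by
      intro acc k hk
      simp only [List.mem_range] at hk
      rw [PySem.List.pyGet?_natCast, List.getElem?_eq_getElem hk]
      simp only []
      by_cases hne : 0 < (ml[k]'hk).length
      · rw [if_pos hne]
        have : ml[k]'hk = ml.getD k [] := (List.getD_eq_getElem ml [] hk).symm
        rw [this]
        exact pvA_block ml k hk acc
      · rw [if_neg hne]
        have hempty : ml.getD k [] = [] := by
          rw [List.getD_eq_getElem ml [] hk]
          exact List.length_eq_zero_iff.mp (by omega)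
        have : pvBlock ml k = [] := by
          unfold pvBlock
          apply List.filter_eq_nil_iff.mpr
          intro j hj
          simp [-List.getD_eq_getElem?_getD, hempty]
        rw [this, List.append_nil])]
  rw [PySem.List.foldl_append_eq_flatMap]
  simp

-- ===== VERDICT (by name: the statement is the Claim_ definition above) =====
theorem filter_isotopes_list_spec : Claim_equal_filter_isotopes_list := by
  intro ml _
  unfold Spec_filter_isotopes_list
  rw [pvA_eq_ref, pvB_eq_ref]
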